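-- pv_equiv track=rewrite | github.com/EwenBorland/adventofcode | scripts/year_2022/day_15/part_2/sol.py | gapInRanges
-- ===== SOURCE A (Python) =====
-- def gapInRanges(ranges,limit):
--     currentIndex = 0
--     found = False
--     while currentIndex < limit:
--         for c, r in enumerate(ranges):
--             found = True
--             r0, r1 = min(r), max(r)
--             if r0 <= currentIndex and r1 >= currentIndex:
--                 currentIndex = r1 + 1
--                 ranges.pop(c)
--                 found = False
--                 break
--         if found:
--             return True, currentIndex
--     return False, 0
-- ===== SOURCE B (Python) =====
-- def gapInRanges(ranges, limit):
--     # Sort the (min, max) pairs by start, then one sweep tracking the reach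
--     # to find the first non-negative uncovered index.  Return-value equivalent
--     # to A on A's terminating inputs; unlike A it does not mutate `ranges`
--     # and always terminates.
--     pairs = sorted(((min(r), max(r)) for r in ranges), key=lambda p: p[0])
--     reach = 0
--     for a, b in pairs:
--         if a > reach:
--             break
--         if b + 1 > reach:
--             reach = b + 1
--     return (True, reach) if reach < limit else (False, 0)
-- ===== Notes on version B (the rewrite author's own statement) =====
-- stated objective: alternative
-- what changed: A repeatedly rescans and pops from the interval list to advance the current index (mutating its argument, and looping forever when the list empties below limit); B sorts the (min,max) pairs by start once and does a single non-mutating sweep tracking the covered reach (O(n log n) vs A's O(n^2) worst case; a timing run did not measure a 1.5x gain, so no speed is claimed).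
-- outside the precondition, e.g. on gapInRanges([[0, 5], []], 3): A returns (False, 0), B raises ValueError; on gapInRanges([[]], 0): A returns (False, 0), B raises ValueError
import Mathlib
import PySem

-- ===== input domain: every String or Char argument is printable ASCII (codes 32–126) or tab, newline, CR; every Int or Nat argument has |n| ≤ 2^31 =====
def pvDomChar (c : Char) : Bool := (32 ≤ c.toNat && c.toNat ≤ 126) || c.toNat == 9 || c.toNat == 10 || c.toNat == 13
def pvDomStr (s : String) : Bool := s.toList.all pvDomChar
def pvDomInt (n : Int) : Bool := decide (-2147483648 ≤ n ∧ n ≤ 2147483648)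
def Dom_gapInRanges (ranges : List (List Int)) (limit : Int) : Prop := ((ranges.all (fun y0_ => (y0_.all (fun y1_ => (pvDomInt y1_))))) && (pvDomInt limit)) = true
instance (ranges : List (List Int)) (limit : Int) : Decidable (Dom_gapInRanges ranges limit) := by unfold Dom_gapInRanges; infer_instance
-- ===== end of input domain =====

-- B replaces A's rescan-and-pop loop by sort-by-start + one sweep; equivalence is about the
-- RETURN value only — Python A pops from `ranges` in place, B does not mutate it.

-- ===== PORT A =====
-- Python min(r) / max(r): PySem.List.min? / max? (none = ValueError on []); the default 0 is
-- only reachable on inputs excluded by Pre_ (an empty inner list that A would inspect).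
def pvMinI (r : List Int) : Int := (PySem.List.min? r (fun x => x)).getD 0
def pvMaxI (r : List Int) : Int := (PySem.List.max? r (fun x => x)).getD 0

-- the inner `for c, r in enumerate(ranges)` up to its `break`: first range covering idx;
-- some (its max, ranges with that occurrence popped); none = the for loop ran to the end
def findCover (rs : List (List Int)) (idx : Int) : Option (Int × List (List Int)) :=
  match rs with
  | [] => none
  | r :: t =>
      let r0 := pvMinI r
      let r1 := pvMaxI r
      if r0 ≤ idx ∧ r1 ≥ idx then some (r1, t)
      else (findCover t idx).map (fun p => (p.1, r :: p.2))

-- the while loop; fuel is a totality guard only: every iteration pops one range or returns,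
-- except the empty-list iteration with found = False, on which CPython loops forever (those
-- inputs are excluded by Pre_), so fuel = length + 1 is never exhausted on admitted inputs.
def loopA (limit : Int) (rem : List (List Int)) (idx : Int) (found : Bool) : Nat → Bool × Int
  | 0 => (false, 0)
  | fuel + 1 =>
      if idx < limit then
        match findCover rem idx with
        | some (r1, rem') => loopA limit rem' (r1 + 1) false fuel
        | none =>
            match rem with
            | [] => if found then (true, idx) else loopA limit rem idx found fuel
            | _ :: _ => (true, idx)
      else (false, 0)

def gapInRanges (ranges : List (List Int)) (limit : Int) : Bool × Int :=
  loopA limit ranges 0 false (ranges.length + 1)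

-- ===== PORT B =====
-- the sweep: for (a, b) in pairs: if a > reach: break; if b+1 > reach: reach = b+1
def sweepB : List (Int × Int) → Int → Int
  | [], reach => reach
  | (a, b) :: t, reach =>
      if a > reach then reach
      else sweepB t (if b + 1 > reach then b + 1 else reach)

def gapInRanges_alt (ranges : List (List Int)) (limit : Int) : Bool × Int :=
  let pairs := PySem.List.sorted (ranges.map (fun r => (pvMinI r, pvMaxI r))) (fun p => p.1) false
  let reach := sweepB pairs 0
  if reach < limit then (true, reach) else (false, 0)

-- ===== PRECONDITION & SPEC =====
-- A's current index is always 0 or max(r)+1 for some r: the candidate points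
def pvCands (ranges : List (List Int)) : List Int := 0 :: ranges.map (fun r => pvMaxI r + 1)

-- first position in the list covering x (A always pops the first covering range)
def pvFirstIdx (ranges : List (List Int)) (x : Int) : Option Nat :=
  List.findIdx? (fun r => decide (pvMinI r ≤ x ∧ pvMaxI r ≥ x)) ranges

-- boolean cover test (for the filter below)
def pvCovb (ranges : List (List Int)) (x : Int) : Bool :=
  ranges.any (fun r => decide (pvMinI r ≤ x ∧ x ≤ pvMaxI r))

-- the first non-negative uncovered index (the minimum uncovered candidate; always exists)
def pvGap (ranges : List (List Int)) : Int :=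
  (((pvCands ranges).filter (fun c => decide (0 ≤ c) && ! pvCovb ranges c)).min?).getD 0

-- Pre_ excludes exactly (a) inputs containing an empty inner range, on which A raises
-- ValueError (min([])) or — when its loop stops before reaching the empty range — returns
-- while B raises ValueError; and (b) inputs on which A's while loop runs forever, which
-- happens precisely when the first uncovered index is below limit and every position of the
-- list is the first cover of some reachable candidate point (so every range gets popped and
-- the loop spins on the empty list).
def Pre_gapInRanges (ranges : List (List Int)) (limit : Int) : Prop :=
  (∀ r ∈ ranges, r ≠ []) ∧
  ¬ (pvGap ranges < limit ∧
     ∀ k, k < ranges.length →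
       ∃ c ∈ pvCands ranges, c < pvGap ranges ∧ pvFirstIdx ranges c = some k)
instance (ranges : List (List Int)) (limit : Int) : Decidable (Pre_gapInRanges ranges limit) := by
  unfold Pre_gapInRanges; infer_instance

def pvWitness_gapInRanges : List (List Int) × Int := ([[0, 2], [5, 6]], 4)

def Spec_gapInRanges (ranges : List (List Int)) (limit : Int) (out : Bool × Int) : Prop := out = gapInRanges_alt ranges limit
instance (ranges : List (List Int)) (limit : Int) (out : Bool × Int) : Decidable (Spec_gapInRanges ranges limit out) := by unfold Spec_gapInRanges; infer_instance

-- ===== CLAIM (what is proved, stated in full; the proofs are below) =====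
def Claim_equal_gapInRanges : Prop := ∀ (ranges : List (List Int)) (limit : Int), Dom_gapInRanges ranges limit → Pre_gapInRanges ranges limit → Spec_gapInRanges ranges limit (gapInRanges ranges limit)

-- ===== LEMMAS AND PROOFS =====

-- Prop-level cover (proof-side twin of pvCovb)
def pvCov (ranges : List (List Int)) (x : Int) : Prop :=
  ∃ r ∈ ranges, pvMinI r ≤ x ∧ x ≤ pvMaxI r

-- the first uncovered index computed by B's sweep
def gV (ranges : List (List Int)) : Int :=
  sweepB (PySem.List.sorted (ranges.map (fun r => (pvMinI r, pvMaxI r))) (fun p => p.1) false) 0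

theorem sweep_ge (ps : List (Int × Int)) : ∀ reach : Int, reach ≤ sweepB ps reach := by
  induction ps with
  | nil => intro reach; simp [sweepB]
  | cons p t ih =>
      intro reach
      obtain ⟨a, b⟩ := p
      by_cases h : a > reach
      · simp [sweepB, h]
      · simp only [sweepB, if_neg h]
        refine le_trans ?_ (ih _)
        split_ifs with h2 <;> omega

theorem sweep_not_cov (ps : List (Int × Int)) (hs : ps.Pairwise (fun p q => p.1 ≤ q.1)) :
    ∀ reach : Int, ∀ p ∈ ps, ¬ (p.1 ≤ sweepB ps reach ∧ sweepB ps reach ≤ p.2) := by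
  induction ps with
  | nil => intro reach p hp; simp at hp
  | cons q t ih =>
      intro reach p hp
      obtain ⟨a, b⟩ := q
      rw [List.pairwise_cons] at hs
      rcases List.mem_cons.mp hp with hp | hp
      · subst hp
        by_cases h : a > reach
        · simp only [sweepB, if_pos h]; intro hc; omega
        · simp only [sweepB, if_neg h]
          by_cases h2 : b + 1 > reach
          · rw [if_pos h2]
            have hge := sweep_ge t (b + 1)
            intro hc; omega
          · rw [if_neg h2]
            have hge := sweep_ge t reach
            intro hc; omega
      · by_cases h : a > reach
        · simp only [sweepB, if_pos h]
          have := hs.1 p hp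
          intro hc; omega
        · simp only [sweepB, if_neg h]
          exact ih hs.2 _ p hp

theorem sweep_cov (ps : List (Int × Int)) :
    ∀ reach x : Int, reach ≤ x → x < sweepB ps reach → ∃ p ∈ ps, p.1 ≤ x ∧ x ≤ p.2 := by
  induction ps with
  | nil => intro reach x h1 h2; simp [sweepB] at h2; omega
  | cons q t ih =>
      intro reach x h1 h2
      obtain ⟨a, b⟩ := q
      by_cases h : a > reach
      · simp [sweepB, if_pos h] at h2; omega
      · simp only [sweepB, if_neg h] at h2
        by_cases hx : x < (if b + 1 > reach then b + 1 else reach)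
        · refine ⟨(a, b), List.mem_cons_self .., ?_, ?_⟩
          · show a ≤ x; omega
          · show x ≤ b; split_ifs at hx with h2' <;> omega
        · have hx2 : (if b + 1 > reach then b + 1 else reach) ≤ x := by omega
          obtain ⟨p, hp, hc⟩ := ih _ x hx2 h2
          exact ⟨p, List.mem_cons_of_mem _ hp, hc⟩

theorem cov_iff_sorted (ranges : List (List Int)) (x : Int) :
    pvCov ranges x ↔
      ∃ p ∈ PySem.List.sorted (ranges.map (fun r => (pvMinI r, pvMaxI r))) (fun p => p.1) false,
        p.1 ≤ x ∧ x ≤ p.2 := by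
  unfold pvCov
  constructor
  · rintro ⟨r, hr, h1, h2⟩
    exact ⟨(pvMinI r, pvMaxI r),
      (PySem.List.mem_sorted _ _ _ _).mpr (List.mem_map.mpr ⟨r, hr, rfl⟩), h1, h2⟩
  · rintro ⟨p, hp, h1, h2⟩
    obtain ⟨r, hr, hre⟩ := List.mem_map.mp ((PySem.List.mem_sorted _ _ _ _).mp hp)
    subst hre
    exact ⟨r, hr, h1, h2⟩

theorem gV_nonneg (ranges : List (List Int)) : 0 ≤ gV ranges := sweep_ge _ 0

theorem gV_not_cov (ranges : List (List Int)) : ¬ pvCov ranges (gV ranges) := by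
  rw [cov_iff_sorted]
  rintro ⟨p, hp, hc⟩
  exact sweep_not_cov _ (PySem.List.sorted_pairwise _ _) 0 p hp hc

theorem gV_cov (ranges : List (List Int)) : ∀ x, 0 ≤ x → x < gV ranges → pvCov ranges x := by
  intro x h0 hx
  rw [cov_iff_sorted]
  exact sweep_cov _ 0 x h0 hx

theorem gV_least (ranges : List (List Int)) (x : Int) (h0 : 0 ≤ x) (h : ¬ pvCov ranges x) :
    gV ranges ≤ x := by
  by_contra hc
  exact h (gV_cov ranges x h0 (by omega))

theorem gV_mem_cands (ranges : List (List Int)) : gV ranges ∈ pvCands ranges := by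
  rcases eq_or_lt_of_le (gV_nonneg ranges) with h0 | h0
  · exact h0 ▸ List.mem_cons_self ..
  · obtain ⟨r, hr, h1, h2⟩ := gV_cov ranges (gV ranges - 1) (by omega) (by omega)
    have hmax : pvMaxI r = gV ranges - 1 := by
      by_contra hne
      exact gV_not_cov ranges ⟨r, hr, by omega, by omega⟩
    exact List.mem_cons_of_mem _
      (List.mem_map.mpr ⟨r, hr, by show pvMaxI r + 1 = gV ranges; omega⟩)

theorem pvCovb_iff (ranges : List (List Int)) (x : Int) :
    pvCovb ranges x = true ↔ pvCov ranges x := by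
  simp [pvCovb, pvCov]

theorem pvGap_eq_gV (ranges : List (List Int)) : pvGap ranges = gV ranges := by
  have hmem : gV ranges ∈
      (pvCands ranges).filter (fun c => decide (0 ≤ c) && ! pvCovb ranges c) := by
    refine List.mem_filter.mpr ⟨gV_mem_cands ranges, ?_⟩
    simp only [Bool.and_eq_true, Bool.not_eq_true', decide_eq_true_eq]
    exact ⟨gV_nonneg ranges, by
      rw [← Bool.not_eq_true, pvCovb_iff]; exact gV_not_cov ranges⟩
  rcases hmin : ((pvCands ranges).filter (fun c => decide (0 ≤ c) && ! pvCovb ranges c)).min? with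
    _ | m
  · rw [List.min?_eq_none_iff] at hmin
    rw [hmin] at hmem
    simp at hmem
  · obtain ⟨hm, hle'⟩ := List.min?_eq_some_iff.mp hmin
    have hmf := List.mem_filter.mp hm
    have h0m : 0 ≤ m := by
      have := hmf.2; simp only [Bool.and_eq_true, decide_eq_true_eq] at this; exact this.1
    have hnc : ¬ pvCov ranges m := by
      have := hmf.2; simp only [Bool.and_eq_true, Bool.not_eq_true'] at this
      rw [← pvCovb_iff, this.2]; simp
    have hle : m ≤ gV ranges := hle' _ hmem
    have hge : gV ranges ≤ m := gV_least ranges m h0m hnc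
    unfold pvGap
    rw [hmin]
    simp; omega

-- pvGap facts (via gV)
theorem pvGap_nonneg (ranges : List (List Int)) : 0 ≤ pvGap ranges := by
  rw [pvGap_eq_gV]; exact gV_nonneg ranges
theorem pvGap_not_cov (ranges : List (List Int)) : ¬ pvCov ranges (pvGap ranges) := by
  rw [pvGap_eq_gV]; exact gV_not_cov ranges
theorem pvGap_cov (ranges : List (List Int)) :
    ∀ x, 0 ≤ x → x < pvGap ranges → pvCov ranges x := by
  rw [pvGap_eq_gV]; exact gV_cov ranges

-- masked remainder: rem = ranges with the positions marked true removed
def maskF : List (List Int) → List Bool → List (List Int)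
  | [], _ => []
  | _ :: _, [] => []
  | r :: rt, b :: bt => if b then maskF rt bt else r :: maskF rt bt

theorem maskF_replicate_false (ranges : List (List Int)) :
    maskF ranges (List.replicate ranges.length false) = ranges := by
  induction ranges with
  | nil => rfl
  | cons r t ih => simp [maskF, List.replicate_succ, ih]

theorem maskF_nil_all_true (ranges : List (List Int)) (mask : List Bool)
    (hl : mask.length = ranges.length) (h : maskF ranges mask = []) :
    ∀ k, (hk : k < mask.length) → mask[k] = true := by
  induction ranges generalizing mask with
  | nil => intro k hk; simp only [List.length_nil] at hl; omega
  | cons r t ih =>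
      cases mask with
      | nil => intro k hk; simp at hk
      | cons b bt =>
          simp only [maskF] at h
          cases b with
          | false => simp at h
          | true =>
              intro k hk
              cases k with
              | zero => rfl
              | succ k =>
                  exact ih bt (by simpa using hl) (by simpa using h) k (by simpa using hk)

-- the inner for loop on the masked list, when every masked range fails the cover test,
-- behaves as the first-cover search on the original list
theorem findCover_maskF_none (ranges : List (List Int)) (mask : List Bool) (idx : Int)
    (hl : mask.length = ranges.length)
    (hm : ∀ k (hk1 : k < mask.length) (hk : k < ranges.length), mask[k] = true →
          ¬ (pvMinI (ranges[k]'hk) ≤ idx ∧ pvMaxI (ranges[k]'hk) ≥ idx))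
    (hnone : pvFirstIdx ranges idx = none) :
    findCover (maskF ranges mask) idx = none := by
  induction ranges generalizing mask with
  | nil => cases mask <;> simp [maskF, findCover]
  | cons r t ih =>
      have hnone' := hnone
      unfold pvFirstIdx at hnone'
      rw [List.findIdx?_cons] at hnone'
      by_cases hcov : pvMinI r ≤ idx ∧ pvMaxI r ≥ idx
      · rw [if_pos (by simpa using hcov)] at hnone'
        simp at hnone'
      · rw [if_neg (by simpa using hcov)] at hnone'
        have htail : pvFirstIdx t idx = none := by
          unfold pvFirstIdx
          cases h : List.findIdx? (fun r => decide (pvMinI r ≤ idx ∧ pvMaxI r ≥ idx)) t with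
          | none => rfl
          | some k => rw [h] at hnone'; simp at hnone'
        cases mask with
        | nil => simp at hl
        | cons b bt =>
            have hlt : bt.length = t.length := by simpa using hl
            have hmt : ∀ k (hk1 : k < bt.length) (hk : k < t.length), bt[k] = true →
                ¬ (pvMinI (t[k]'hk) ≤ idx ∧ pvMaxI (t[k]'hk) ≥ idx) := by
              intro k hk1 hk hb
              exact hm (k + 1) (by simpa using Nat.succ_lt_succ hk1)
                (by simpa using Nat.succ_lt_succ hk) (by simpa using hb)
            cases b with
            | true => simpa [maskF] using ih bt hlt hmt htail
            | false =>
                simp only [maskF, if_neg Bool.false_ne_true, findCover]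
                rw [if_neg hcov, ih bt hlt hmt htail]
                rfl

theorem findCover_maskF_some (ranges : List (List Int)) (mask : List Bool) (idx : Int) (k : Nat)
    (hl : mask.length = ranges.length)
    (hm : ∀ j (hj1 : j < mask.length) (hj : j < ranges.length), mask[j] = true →
          ¬ (pvMinI (ranges[j]'hj) ≤ idx ∧ pvMaxI (ranges[j]'hj) ≥ idx))
    (hsome : pvFirstIdx ranges idx = some k) :
    ∃ (hk : k < ranges.length) (hk1 : k < mask.length),
      mask[k] = false ∧
      (pvMinI (ranges[k]'hk) ≤ idx ∧ pvMaxI (ranges[k]'hk) ≥ idx) ∧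
      findCover (maskF ranges mask) idx =
        some (pvMaxI (ranges[k]'hk), maskF ranges (mask.set k true)) ∧
      (maskF ranges (mask.set k true)).length + 1 = (maskF ranges mask).length := by
  induction ranges generalizing mask k with
  | nil => simp [pvFirstIdx] at hsome
  | cons r t ih =>
      have hsome' := hsome
      unfold pvFirstIdx at hsome'
      rw [List.findIdx?_cons] at hsome'
      cases mask with
      | nil => simp at hl
      | cons b bt =>
          have hlt : bt.length = t.length := by simpa using hl
          have hmt : ∀ j (hj1 : j < bt.length) (hj : j < t.length), bt[j] = true →
              ¬ (pvMinI (t[j]'hj) ≤ idx ∧ pvMaxI (t[j]'hj) ≥ idx) := by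
            intro j hj1 hj hb
            exact hm (j + 1) (by simpa using Nat.succ_lt_succ hj1)
              (by simpa using Nat.succ_lt_succ hj) (by simpa using hb)
          by_cases hcov : pvMinI r ≤ idx ∧ pvMaxI r ≥ idx
          · rw [if_pos (by simpa using hcov)] at hsome'
            have hk0 : k = 0 := by
              have := Option.some.inj hsome'; omega
            subst hk0
            have hb : b = false := by
              cases b with
              | false => rfl
              | true => exact absurd hcov (hm 0 (by simp) (by simp) (by simp))
            subst hb
            refine ⟨by simp, by simp, by simp, by simpa using hcov, ?_, ?_⟩
            · simp [maskF, findCover, hcov, List.set]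
            · simp [maskF, List.set]
          · rw [if_neg (by simpa using hcov)] at hsome'
            cases hft : List.findIdx? (fun r => decide (pvMinI r ≤ idx ∧ pvMaxI r ≥ idx)) t with
            | none => rw [hft] at hsome'; simp at hsome'
            | some k' =>
                rw [hft] at hsome'
                simp only [Option.map_some, Option.some.injEq] at hsome'
                subst hsome'
                obtain ⟨hk', hk1', hmk', hcov', hfc', hlen'⟩ := ih bt k' hlt hmt hft
                refine ⟨by simpa using Nat.succ_lt_succ hk',
                  by simpa using Nat.succ_lt_succ hk1',
                  by simpa using hmk', by simpa using hcov', ?_, ?_⟩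
                · cases b with
                  | true =>
                      simpa [maskF, List.set] using hfc'
                  | false =>
                      simp only [maskF, if_neg Bool.false_ne_true, findCover, List.set]
                      rw [if_neg hcov, hfc']
                      rfl
                · cases b with
                  | true => simpa [maskF, List.set] using hlen'
                  | false => simpa [maskF, List.set] using hlen'

theorem cov_firstIdx_some (ranges : List (List Int)) (x : Int) (h : pvCov ranges x) :
    ∃ k, pvFirstIdx ranges x = some k := by
  cases hf : pvFirstIdx ranges x with
  | some k => exact ⟨k, rfl⟩
  | none =>
      obtain ⟨r, hr, h1, h2⟩ := h
      unfold pvFirstIdx at hf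
      have := List.findIdx?_eq_none_iff.mp hf r hr
      simp at this
      omega

theorem not_cov_firstIdx_none (ranges : List (List Int)) (x : Int) (h : ¬ pvCov ranges x) :
    pvFirstIdx ranges x = none := by
  unfold pvFirstIdx
  rw [List.findIdx?_eq_none_iff]
  intro r hr
  simp only [decide_eq_false_iff_not]
  exact fun hc => absurd ⟨r, hr, hc.1, hc.2⟩ h

-- the main loop invariant: rem = maskF ranges mask, every popped (masked) position has
-- max below idx and was the first cover of a reachable candidate below the gap
theorem loopA_main (ranges : List (List Int)) (limit : Int)
    (hpre : ¬ (pvGap ranges < limit ∧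
      ∀ k, k < ranges.length →
        ∃ c ∈ pvCands ranges, c < pvGap ranges ∧ pvFirstIdx ranges c = some k)) :
    ∀ (fuel : Nat) (mask : List Bool) (idx : Int),
      mask.length = ranges.length →
      (maskF ranges mask).length + 1 ≤ fuel →
      0 ≤ idx → idx ≤ pvGap ranges → idx ∈ pvCands ranges →
      (∀ k (hk1 : k < mask.length) (hk : k < ranges.length), mask[k] = true →
        pvMaxI (ranges[k]'hk) < idx ∧
        ∃ c ∈ pvCands ranges, c < pvGap ranges ∧ pvFirstIdx ranges c = some k) →
      loopA limit (maskF ranges mask) idx false fuel =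
        if pvGap ranges < limit then (true, pvGap ranges) else (false, 0) := by
  intro fuel
  induction fuel with
  | zero => intro mask idx _ hf; omega
  | succ f ih =>
      intro mask idx hl hf h0 hg hcand hmask
      have hmnc : ∀ j (hj1 : j < mask.length) (hj : j < ranges.length), mask[j] = true →
          ¬ (pvMinI (ranges[j]'hj) ≤ idx ∧ pvMaxI (ranges[j]'hj) ≥ idx) := by
        intro j hj1 hj hb hc
        have := (hmask j hj1 hj hb).1
        omega
      by_cases hidx : idx < limit
      · rcases eq_or_lt_of_le hg with heq | hlt
        · -- idx = pvGap: the for loop finds no cover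
          have hnone := not_cov_firstIdx_none ranges idx (heq ▸ pvGap_not_cov ranges)
          have hfc := findCover_maskF_none ranges mask idx hl hmnc hnone
          cases hrem : maskF ranges mask with
          | cons a t =>
              have hstep : loopA limit (a :: t) idx false (f + 1) = (true, idx) := by
                rw [hrem] at hfc
                simp [loopA, if_pos hidx, hfc]
              rw [hstep, heq, if_pos (show pvGap ranges < limit by omega)]
          | nil =>
              exfalso
              apply hpre
              refine ⟨by omega, fun k hk => ?_⟩
              exact (hmask k (by omega)  hk
                (maskF_nil_all_true ranges mask hl hrem k (by omega))).2
        · -- idx < pvGap: idx is covered, pop the first covering range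
          have hcov := pvGap_cov ranges idx h0 hlt
          obtain ⟨k, hk⟩ := cov_firstIdx_some ranges idx hcov
          obtain ⟨hklt, hklt1, hmk, hkcov, hfc, hlen⟩ :=
            findCover_maskF_some ranges mask idx k hl hmnc hk
          have hrk_mem : ranges[k]'hklt ∈ ranges := List.getElem_mem hklt
          have hmaxlt : pvMaxI (ranges[k]'hklt) < pvGap ranges := by
            by_contra hge
            exact pvGap_not_cov ranges ⟨ranges[k]'hklt, hrk_mem, by omega, by omega⟩
          simp only [loopA, if_pos hidx, hfc]
          refine ih (mask.set k true) (pvMaxI (ranges[k]'hklt) + 1)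
            (by simpa using hl) (by omega) (by omega) (by omega) ?_ ?_
          · exact List.mem_cons_of_mem _
              (List.mem_map.mpr ⟨ranges[k]'hklt, hrk_mem, rfl⟩)
          · intro j hj1 hj hb
            by_cases hjk : j = k
            · subst hjk
              exact ⟨by omega, idx, hcand, hlt, hk⟩
            · rw [List.getElem_set_ne (by omega)] at hb
              have := hmask j (by simpa using hj1) hj hb
              exact ⟨by omega, this.2⟩
      · simp only [loopA, if_neg hidx]
        rw [if_neg (by omega)]

theorem alt_eq (ranges : List (List Int)) (limit : Int) :
    gapInRanges_alt ranges limit =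
      if gV ranges < limit then (true, gV ranges) else (false, 0) := rfl

-- ===== VERDICT (by name: the statement is the Claim_ definition above) =====
theorem gapInRanges_spec : Claim_equal_gapInRanges := by
  intro ranges limit _ hpre
  unfold Spec_gapInRanges gapInRanges
  rw [alt_eq, ← pvGap_eq_gV]
  have h := loopA_main ranges limit hpre.2 (ranges.length + 1)
    (List.replicate ranges.length false) 0
    (by simp) (by simp [maskF_replicate_false]) le_rfl (pvGap_nonneg ranges)
    (List.mem_cons_self ..)
    (fun k hk1 hk hb => by simp at hb)
  rw [maskF_replicate_false] at h
  exact h
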